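-- pv_equiv track=rewrite | github.com/ChanukOh/noob | 프로그래머스/1/159994. 카드 뭉치/카드 뭉치.py | solution
-- ===== SOURCE A (Python) =====
-- def solution(cards1, cards2, goal):
--     for i in goal:
--         if i==cards1[0]:
--             cards1.pop(0)
--             cards1.append("!!!!!!")
--         elif i==cards2[0]:
--             cards2.pop(0)
--             cards2.append("!!!!!!")
--         else:
--             return "No"
--     return "Yes"
-- ===== SOURCE B (Python) =====
-- # Two-pointer scan over the unchanged lists instead of A's pop(0)/append-sentinel mutation;
-- # does not mutate the decks (A does).
-- def solution(cards1, cards2, goal):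
--     i = j = 0
--     for card in goal:
--         if i < len(cards1) and card == cards1[i]:
--             i += 1
--         elif j < len(cards2) and card == cards2[j]:
--             j += 1
--         else:
--             return "No"
--     return "Yes"
-- ===== Notes on version B (the rewrite author's own statement) =====
-- stated objective: alternative
-- what changed: Replaces the pop(0)/append-sentinel mutation of both decks with two read-only index pointers advanced over the unchanged lists.
-- outside the precondition, e.g. on solution([], ['b'], ['b']): A raises IndexError, B returns 'Yes'; on solution(['a'], ['b'], ['a', '!!!!!!']): A returns 'Yes', B returns 'No'
import Mathlib
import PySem

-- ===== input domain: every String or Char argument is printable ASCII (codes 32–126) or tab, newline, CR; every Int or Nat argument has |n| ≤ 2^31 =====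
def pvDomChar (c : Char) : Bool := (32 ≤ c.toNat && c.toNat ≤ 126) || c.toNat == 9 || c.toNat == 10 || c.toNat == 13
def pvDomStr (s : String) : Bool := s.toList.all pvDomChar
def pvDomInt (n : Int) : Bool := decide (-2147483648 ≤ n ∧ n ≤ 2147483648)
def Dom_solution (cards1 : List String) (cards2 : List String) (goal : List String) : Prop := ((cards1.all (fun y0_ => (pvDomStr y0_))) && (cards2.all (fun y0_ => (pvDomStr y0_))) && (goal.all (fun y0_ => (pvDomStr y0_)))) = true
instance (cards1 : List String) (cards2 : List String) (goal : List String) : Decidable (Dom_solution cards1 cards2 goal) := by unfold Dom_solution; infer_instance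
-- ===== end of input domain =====

-- B: two-pointer scan instead of A's pop(0)/append-sentinel mutation (A mutates its deck arguments in
-- place; the equivalence proved here is about the return value only).

-- ===== PORT A =====
def solutionAux : List String → List String → List String → String
  | _, _, [] => "Yes"
  | c1, c2, i :: rest =>
    match c1 with
    | [] => ""  -- Python raises IndexError here; excluded by Pre_solution
    | h1 :: t1 =>
      if i == h1 then
        solutionAux (t1 ++ ["!!!!!!"]) c2 rest
      else
        match c2 with
        | [] => ""  -- Python raises IndexError here; excluded by Pre_solution
        | h2 :: t2 =>
          if i == h2 then
            solutionAux (h1 :: t1) (t2 ++ ["!!!!!!"]) rest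
          else "No"

def solution (cards1 : List String) (cards2 : List String) (goal : List String) : String :=
  solutionAux cards1 cards2 goal

-- ===== PORT B =====
def solution_altAux (cards1 : List String) (cards2 : List String) : List String → Nat → Nat → String
  | [], _, _ => "Yes"
  | card :: rest, i, j =>
    if i < cards1.length && cards1[i]? == some card then
      solution_altAux cards1 cards2 rest (i + 1) j
    else if j < cards2.length && cards2[j]? == some card then
      solution_altAux cards1 cards2 rest i (j + 1)
    else "No"

def solution_alt (cards1 : List String) (cards2 : List String) (goal : List String) : String :=
  solution_altAux cards1 cards2 goal 0 0

-- ===== PRECONDITION & SPEC =====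
-- Pre_ excludes (a) inputs where A raises IndexError (a deck is empty and its head is reached:
-- cards1 empty with a nonempty goal, or cards2 empty with goal not a prefix of cards1) and
-- (b) goals containing the sentinel string "!!!!!!", outside the task's card domain, which A's
-- pop-and-append scheme can accidentally match after a deck is exhausted.
def Pre_solution (cards1 : List String) (cards2 : List String) (goal : List String) : Prop :=
  (goal = [] ∨ (cards1 ≠ [] ∧ (cards2 ≠ [] ∨ goal <+: cards1))) ∧ "!!!!!!" ∉ goal
instance (cards1 : List String) (cards2 : List String) (goal : List String) : Decidable (Pre_solution cards1 cards2 goal) := by unfold Pre_solution; infer_instance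

def pvWitness_solution : List String × List String × List String := (["a", "b"], ["c"], ["a", "c", "b"])

def Spec_solution (cards1 : List String) (cards2 : List String) (goal : List String) (out : String) : Prop := out = solution_alt cards1 cards2 goal
instance (cards1 : List String) (cards2 : List String) (goal : List String) (out : String) : Decidable (Spec_solution cards1 cards2 goal out) := by unfold Spec_solution; infer_instance

-- ===== CLAIM (what is proved, stated in full; the proofs are below) =====
def Claim_equal_solution : Prop := ∀ (cards1 : List String) (cards2 : List String) (goal : List String), Dom_solution cards1 cards2 goal → Pre_solution cards1 cards2 goal → Spec_solution cards1 cards2 goal (solution cards1 cards2 goal)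

-- ===== LEMMAS AND PROOFS =====

-- A's deck after k successful matches is (original.drop k) ++ (replicate k "!!!!!!"); the key
-- invariant lemma relating A's mutated-deck recursion to B's two pointers.
theorem solutionAux_eq (goal : List String) :
    ∀ (c1 c2 : List String) (i j : Nat),
      "!!!!!!" ∉ goal → c1 ≠ [] → c2 ≠ [] → i ≤ c1.length → j ≤ c2.length →
      solutionAux (c1.drop i ++ List.replicate i "!!!!!!") (c2.drop j ++ List.replicate j "!!!!!!") goal
        = solution_altAux c1 c2 goal i j := by
  induction goal with
  | nil => intro c1 c2 i j _ _ _ _ _; rfl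
  | cons card rest ih =>
    intro c1 c2 i j hs h1 h2 hi hj
    have hsc : card ≠ "!!!!!!" := by intro h; exact hs (by simp [h])
    have hsr : "!!!!!!" ∉ rest := fun h => hs (List.mem_cons_of_mem _ h)
    -- analyse the state of deck 1
    rcases Nat.lt_or_eq_of_le hi with hi' | hi'
    · -- i < c1.length : A's head is c1[i]
      have hd1 : c1.drop i = c1[i] :: c1.drop (i + 1) := List.drop_eq_getElem_cons hi'
      by_cases e1 : card = c1[i]
      · -- match on deck 1
        have heq : c1.drop (i+1) ++ List.replicate i "!!!!!!" ++ ["!!!!!!"]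
            = c1.drop (i+1) ++ List.replicate (i+1) "!!!!!!" := by
          simp [List.replicate_succ' (n := i), List.append_assoc]
        simp only [solutionAux, solution_altAux, hd1, List.cons_append]
        rw [if_pos (by simp [e1]), if_pos (by simp [hi', e1, c1.getElem?_eq_getElem hi'])]
        rw [heq]
        exact ih c1 c2 (i+1) j hsr h1 h2 hi' hj
      · -- no match on deck 1; analyse deck 2
        have bno1 : ¬ (decide (i < c1.length) && (c1[i]? == some card)) = true := by
          simp [c1.getElem?_eq_getElem hi']; intro _ h; exact e1 h.symm
        rcases Nat.lt_or_eq_of_le hj with hj' | hj'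
        · have hd2 : c2.drop j = c2[j] :: c2.drop (j + 1) := List.drop_eq_getElem_cons hj'
          by_cases e2 : card = c2[j]
          · have heq : c2.drop (j+1) ++ List.replicate j "!!!!!!" ++ ["!!!!!!"]
                = c2.drop (j+1) ++ List.replicate (j+1) "!!!!!!" := by
              simp [List.replicate_succ' (n := j), List.append_assoc]
            simp only [solutionAux, solution_altAux, hd1, hd2, List.cons_append]
            rw [if_neg (by simp [e1]), if_neg bno1,
                if_pos (by simp [e2]), if_pos (by simp [hj', e2, c2.getElem?_eq_getElem hj'])]
            rw [heq, show (c1[i] :: (List.drop (i+1) c1 ++ List.replicate i "!!!!!!"))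
                = List.drop i c1 ++ List.replicate i "!!!!!!" from by rw [hd1, List.cons_append]]
            exact ih c1 c2 i (j+1) hsr h1 h2 (Nat.le_of_lt hi') hj'
          · simp only [solutionAux, solution_altAux, hd1, hd2, List.cons_append]
            rw [if_neg (by simp [e1]), if_neg bno1, if_neg (by simp [e2]),
                if_neg (by simp [c2.getElem?_eq_getElem hj']; intro _ h; exact e2 h.symm)]
        · -- j = c2.length : A's head of deck 2 is the sentinel, which card never equals
          have hj0 : 0 < j := hj' ▸ List.length_pos_iff.mpr h2
          have hd2 : c2.drop j ++ List.replicate j "!!!!!!"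
              = "!!!!!!" :: List.replicate (j-1) "!!!!!!" := by
            obtain ⟨n, hn⟩ : ∃ n, j = n + 1 := ⟨j - 1, by omega⟩
            rw [hn, List.drop_eq_nil_of_le (by omega), List.nil_append, List.replicate_succ]
            simp [hn]
          simp only [solutionAux, solution_altAux, hd1, List.cons_append, hd2]
          rw [if_neg (by simp [e1]), if_neg bno1, if_neg (by simp [hsc]),
              if_neg (by simp [hj'])]
    · -- i = c1.length : A's head of deck 1 is the sentinel
      have hi0 : 0 < i := hi' ▸ List.length_pos_iff.mpr h1
      have hd1 : c1.drop i ++ List.replicate i "!!!!!!"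
          = "!!!!!!" :: List.replicate (i-1) "!!!!!!" := by
        obtain ⟨n, hn⟩ : ∃ n, i = n + 1 := ⟨i - 1, by omega⟩
        rw [hn, List.drop_eq_nil_of_le (by omega), List.nil_append, List.replicate_succ]
        simp [hn]
      have bno1 : ¬ (decide (i < c1.length) && (c1[i]? == some card)) = true := by
        simp [hi']
      rcases Nat.lt_or_eq_of_le hj with hj' | hj'
      · have hd2 : c2.drop j = c2[j] :: c2.drop (j + 1) := List.drop_eq_getElem_cons hj'
        by_cases e2 : card = c2[j]
        · have heq : c2.drop (j+1) ++ List.replicate j "!!!!!!" ++ ["!!!!!!"]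
              = c2.drop (j+1) ++ List.replicate (j+1) "!!!!!!" := by
            simp [List.replicate_succ' (n := j), List.append_assoc]
          simp only [solutionAux, solution_altAux, hd1, hd2, List.cons_append]
          rw [if_neg (by simp [hsc]), if_neg bno1,
              if_pos (by simp [e2]), if_pos (by simp [hj', e2, c2.getElem?_eq_getElem hj'])]
          rw [heq, ← hd1]
          exact ih c1 c2 i (j+1) hsr h1 h2 (Nat.le_of_eq hi') hj'
        · simp only [solutionAux, solution_altAux, hd1, hd2, List.cons_append]
          rw [if_neg (by simp [hsc]), if_neg bno1, if_neg (by simp [e2]),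
              if_neg (by simp [c2.getElem?_eq_getElem hj']; intro _ h; exact e2 h.symm)]
      · have hj0 : 0 < j := hj' ▸ List.length_pos_iff.mpr h2
        have hd2 : c2.drop j ++ List.replicate j "!!!!!!"
            = "!!!!!!" :: List.replicate (j-1) "!!!!!!" := by
          obtain ⟨n, hn⟩ : ∃ n, j = n + 1 := ⟨j - 1, by omega⟩
          rw [hn, List.drop_eq_nil_of_le (by omega), List.nil_append, List.replicate_succ]
          simp [hn]
        simp only [solutionAux, solution_altAux, hd1, hd2]
        rw [if_neg (by simp [hsc]), if_neg bno1, if_neg (by simp [hsc]),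
            if_neg (by simp [hj'])]

-- When goal is a prefix of the unread part of deck 1, A answers "Yes" without ever reading deck 2.
theorem solutionAux_yes (goal : List String) :
    ∀ (c1 c2 : List String) (i : Nat), goal <+: c1.drop i →
      solutionAux (c1.drop i ++ List.replicate i "!!!!!!") c2 goal = "Yes" := by
  induction goal with
  | nil => intro c1 c2 i _; rfl
  | cons card rest ih =>
    intro c1 c2 i hp
    obtain ⟨t, ht⟩ := hp
    have hi : i < c1.length := by
      have := congrArg List.length ht
      simp [List.length_drop] at this
      omega
    have hd1 : c1.drop i = c1[i] :: c1.drop (i + 1) := List.drop_eq_getElem_cons hi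
    rw [hd1, List.cons_append, List.cons.injEq] at ht
    obtain ⟨hcard, hrest⟩ := ht
    have heq : c1.drop (i+1) ++ List.replicate i "!!!!!!" ++ ["!!!!!!"]
        = c1.drop (i+1) ++ List.replicate (i+1) "!!!!!!" := by
      simp [List.replicate_succ' (n := i), List.append_assoc]
    simp only [solutionAux, hd1, List.cons_append]
    rw [if_pos (by simp [hcard]), heq]
    exact ih c1 c2 (i+1) ⟨t, hrest⟩

theorem solution_altAux_yes (goal : List String) :
    ∀ (c1 c2 : List String) (i j : Nat), goal <+: c1.drop i →
      solution_altAux c1 c2 goal i j = "Yes" := by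
  induction goal with
  | nil => intro c1 c2 i j _; rfl
  | cons card rest ih =>
    intro c1 c2 i j hp
    obtain ⟨t, ht⟩ := hp
    have hi : i < c1.length := by
      have := congrArg List.length ht
      simp [List.length_drop] at this
      omega
    have hd1 : c1.drop i = c1[i] :: c1.drop (i + 1) := List.drop_eq_getElem_cons hi
    rw [hd1, List.cons_append, List.cons.injEq] at ht
    obtain ⟨hcard, hrest⟩ := ht
    simp only [solution_altAux]
    rw [if_pos (by simp [hi, hcard, c1.getElem?_eq_getElem hi])]
    exact ih c1 c2 (i+1) j ⟨t, hrest⟩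

-- ===== VERDICT (by name: the statement is the Claim_ definition above) =====
theorem solution_spec : Claim_equal_solution := by
  intro c1 c2 goal _ hpre
  rcases hpre with ⟨hcase, hs⟩
  unfold Spec_solution solution solution_alt
  rcases hcase with hg | ⟨h1, h2 | hpre⟩
  · subst hg; rfl
  · have := solutionAux_eq goal c1 c2 0 0 hs h1 h2 (Nat.zero_le _) (Nat.zero_le _)
    simpa using this
  · have hA := solutionAux_yes goal c1 c2 0 (by simpa using hpre)
    have hB := solution_altAux_yes goal c1 c2 0 0 (by simpa using hpre)
    simp only [List.drop_zero, List.replicate_zero, List.append_nil] at hA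
    rw [hA, hB]
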